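-- pv_equiv track=rewrite | github.com/itsramazain/Synth_Innovation_Phase | JOSDC_innovation/supersacler/cycle_acc/test.py | align_cycle_accurate_data
-- ===== SOURCE A (Python) =====
-- def align_cycle_accurate_data(cycle_accurate_data):
--     """
--     Shift the cycle-accurate data by one cycle to align it with the hardware data.
--
--     Args:
--         cycle_accurate_data (dict): Cycle-accurate data dictionary.
--
--     Returns:
--         dict: Shifted cycle-accurate data dictionary.
--     """
--     aligned_data = {}
--     previous_registers = []
--
--     for cycle in sorted(cycle_accurate_data.keys()):
--         # Align the current cycle to the next cycle's data
--         aligned_data[cycle + 1] = previous_registers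
--         previous_registers = cycle_accurate_data[cycle]
--
--     # Remove the first "unrealistic" cycle
--     if 1 in aligned_data:
--         del aligned_data[1]
--
--     return aligned_data
-- ===== SOURCE B (Python) =====
-- def align_cycle_accurate_data(cycle_accurate_data):
--     """Shift the cycle-accurate data by one cycle to align it with the hardware data.
--
--     For every cycle k, the aligned value at k + 1 is the data of k's predecessor
--     cycle (the greatest key smaller than k), or [] when k has no predecessor.
--     """
--     keys = sorted(cycle_accurate_data)
--     aligned_data = {}
--     for k in keys:
--         below = [j for j in keys if j < k]
--         aligned_data[k + 1] = cycle_accurate_data[below[-1]] if below else []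
--     if 1 in aligned_data:
--         del aligned_data[1]
--     return aligned_data
-- ===== Notes on version B (the rewrite author's own statement) =====
-- stated objective: alternative
-- what changed: Instead of threading a previous_registers accumulator through one pass over the sorted keys, B computes each aligned value independently: for every key it looks up its predecessor key (the greatest smaller key) by filtering the key list, falling back to an empty register list when no predecessor exists.
import Mathlib
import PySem

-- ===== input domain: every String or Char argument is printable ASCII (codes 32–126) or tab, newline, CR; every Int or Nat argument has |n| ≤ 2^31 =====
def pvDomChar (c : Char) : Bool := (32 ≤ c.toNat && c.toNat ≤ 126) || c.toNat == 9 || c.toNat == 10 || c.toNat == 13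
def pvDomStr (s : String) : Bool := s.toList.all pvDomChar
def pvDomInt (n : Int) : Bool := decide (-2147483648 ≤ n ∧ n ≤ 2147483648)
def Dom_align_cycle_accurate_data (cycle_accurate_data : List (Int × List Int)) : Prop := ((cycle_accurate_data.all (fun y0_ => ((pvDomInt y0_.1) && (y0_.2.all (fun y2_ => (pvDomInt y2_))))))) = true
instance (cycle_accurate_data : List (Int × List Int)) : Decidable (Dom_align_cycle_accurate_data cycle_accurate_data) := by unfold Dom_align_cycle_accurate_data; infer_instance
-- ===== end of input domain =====

-- B replaces A's threaded previous_registers accumulator by an independent per-key predecessor lookup (greatest key below each key); alternative algorithm, quadratic, not faster.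


-- ===== PORT A =====
def align_cycle_accurate_data (cycle_accurate_data : List (Int × List Int)) : List (Int × List Int) :=
  let d := PySem.Dict.ofList cycle_accurate_data
  let st := (PySem.List.sorted d.keys (fun x => x) false).foldl
    (fun (st : PySem.Dict Int (List Int) × List Int) cycle =>
      (st.1.insert (cycle + 1) st.2, d.getD cycle []))   -- d[cycle]: cycle ∈ d.keys, so getD is exact
    (PySem.Dict.empty, [])
  let aligned_data := st.1
  (if aligned_data.contains 1 then aligned_data.erase 1 else aligned_data).items

-- ===== PORT B =====
def align_cycle_accurate_data_alt (cycle_accurate_data : List (Int × List Int)) : List (Int × List Int) :=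
  let d := PySem.Dict.ofList cycle_accurate_data
  let keys := PySem.List.sorted d.keys (fun x => x) false
  let aligned_data := keys.foldl
    (fun (a : PySem.Dict Int (List Int)) k =>
      let below := keys.filter (fun j => decide (j < k))
      -- `cycle_accurate_data[below[-1]] if below else []`: below[-1] on a nonempty
      -- list is its last element, so guard+negative index become getLast?
      a.insert (k + 1)
        (match below.getLast? with
         | some m => d.getD m []    -- d[m]: m ∈ keys, so getD is exact
         | none   => []))
    PySem.Dict.empty
  (if aligned_data.contains 1 then aligned_data.erase 1 else aligned_data).items

-- ===== PRECONDITION & SPEC =====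
def Spec_align_cycle_accurate_data (cycle_accurate_data : List (Int × List Int)) (out : List (Int × List Int)) : Prop := out = align_cycle_accurate_data_alt cycle_accurate_data
instance (cycle_accurate_data : List (Int × List Int)) (out : List (Int × List Int)) : Decidable (Spec_align_cycle_accurate_data cycle_accurate_data out) := by unfold Spec_align_cycle_accurate_data; infer_instance

-- ===== CLAIM (what is proved, stated in full; the proofs are below) =====
def Claim_equal_align_cycle_accurate_data : Prop := ∀ (cycle_accurate_data : List (Int × List Int)), Dom_align_cycle_accurate_data cycle_accurate_data → Spec_align_cycle_accurate_data cycle_accurate_data (align_cycle_accurate_data cycle_accurate_data)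

-- ===== LEMMAS AND PROOFS =====

/-- On a strictly increasing list `pre ++ k :: t`, the elements `< k` are exactly `pre`. -/
theorem filter_lt_of_pairwise (pre t : List Int) (k : Int)
    (hp : (pre ++ k :: t).Pairwise (· < ·)) :
    (pre ++ k :: t).filter (fun j => decide (j < k)) = pre := by
  rw [List.pairwise_append] at hp
  obtain ⟨hpre, hkt, hcross⟩ := hp
  rw [List.filter_append]
  have h1 : pre.filter (fun j => decide (j < k)) = pre := by
    apply List.filter_eq_self.mpr
    intro x hx
    simpa using hcross x hx k (List.mem_cons_self)
  have h2 : (k :: t).filter (fun j => decide (j < k)) = [] := by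
    apply List.filter_eq_nil_iff.mpr
    intro x hx
    rcases List.mem_cons.mp hx with rfl | hx'
    · simp
    · have := (List.pairwise_cons.mp hkt).1 x hx'
      simp; omega
  rw [h1, h2, List.append_nil]

/-- A's threaded fold over a suffix `t` of the strictly increasing key list
    `s = pre ++ t`, started from the data of `pre`'s last key, equals B's
    predecessor-lookup fold over `t` (which filters the full list `s`). -/
theorem fold_thread_eq_pred (f : Int → List Int) (s : List Int)
    (hs : s.Pairwise (· < ·)) :
    ∀ (t pre : List Int) (a0 : PySem.Dict Int (List Int)), s = pre ++ t →
      (t.foldl (fun (st : PySem.Dict Int (List Int) × List Int) k =>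
          (st.1.insert (k + 1) st.2, f k))
        (a0, match pre.getLast? with | some m => f m | none => [])).1
      = t.foldl (fun (a : PySem.Dict Int (List Int)) k =>
          a.insert (k + 1)
            (match (s.filter (fun j => decide (j < k))).getLast? with
             | some m => f m
             | none   => [])) a0 := by
  intro t
  induction t with
  | nil => intro pre a0 _; rfl
  | cons k t' ih =>
    intro pre a0 hsplit
    have hfil : s.filter (fun j => decide (j < k)) = pre := by
      rw [hsplit]; exact filter_lt_of_pairwise pre t' k (hsplit ▸ hs)
    simp only [List.foldl_cons, hfil]
    have hsplit' : s = (pre ++ [k]) ++ t' := by simpa using hsplit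
    have := ih (pre ++ [k]) (a0.insert (k + 1)
        (match pre.getLast? with | some m => f m | none => [])) hsplit'
    rwa [List.getLast?_concat] at this

theorem align_eq (cycle_accurate_data : List (Int × List Int)) :
    align_cycle_accurate_data cycle_accurate_data
      = align_cycle_accurate_data_alt cycle_accurate_data := by
  have hnodup : (PySem.List.sorted (PySem.Dict.ofList cycle_accurate_data).keys (fun x => x) false).Nodup :=
    (PySem.List.sorted_perm _ (fun x => x) false).symm.nodup
      (PySem.Dict.nodup_keys_ofList cycle_accurate_data)
  have hle := PySem.List.sorted_pairwise (PySem.Dict.ofList cycle_accurate_data).keys (fun x => x)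
  have hlt : (PySem.List.sorted (PySem.Dict.ofList cycle_accurate_data).keys (fun x => x) false).Pairwise (· < ·) := by
    have := hnodup.imp_of_mem (fun {a b} _ _ h => h) |>.and hle
    exact this.imp (fun ⟨hne, hleab⟩ => lt_of_le_of_ne hleab hne)
  have key := fold_thread_eq_pred (fun k => (PySem.Dict.ofList cycle_accurate_data).getD k []) _ hlt
    (PySem.List.sorted (PySem.Dict.ofList cycle_accurate_data).keys (fun x => x) false)
    [] PySem.Dict.empty rfl
  simp only [List.getLast?_nil] at key
  simp only [align_cycle_accurate_data, align_cycle_accurate_data_alt, key]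

-- ===== VERDICT (by name: the statement is the Claim_ definition above) =====
theorem align_cycle_accurate_data_spec : Claim_equal_align_cycle_accurate_data := by
  intro l _
  exact align_eq l
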